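-- pv_equiv track=rewrite | github.com/c10coding/cs112-project-3 | cowens26_243_P3.py | dif_oddsumcount
-- ===== SOURCE A (Python) =====
-- def dif_oddsumcount(n):
--     if n == 0:
--         return 0
--     else:
--         odd_numbers = []
--         # Gets all the odd numbers
--         for i in range(1, n + 1, 2):
--             odd_numbers.append(i)
--
--         num_odd_numbers = len(odd_numbers)
--         sum_odd_numbers = 0
--         for num in odd_numbers:
--             sum_odd_numbers += num
--
--         return abs(sum_odd_numbers - num_odd_numbers)
-- ===== SOURCE B (Python) =====
-- def dif_oddsumcount(n):
--     # closed form: there are k = (n+1)//2 odd numbers in 1..n, their sum is k*k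
--     if n <= 0:
--         return 0
--     k = (n + 1) // 2
--     return k * (k - 1)
-- ===== Notes on version B (the rewrite author's own statement) =====
-- stated objective: faster
-- what changed: Replaces building a list of odds and summing it with the closed form k*(k-1) where k=(n+1)//2.
import Mathlib
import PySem

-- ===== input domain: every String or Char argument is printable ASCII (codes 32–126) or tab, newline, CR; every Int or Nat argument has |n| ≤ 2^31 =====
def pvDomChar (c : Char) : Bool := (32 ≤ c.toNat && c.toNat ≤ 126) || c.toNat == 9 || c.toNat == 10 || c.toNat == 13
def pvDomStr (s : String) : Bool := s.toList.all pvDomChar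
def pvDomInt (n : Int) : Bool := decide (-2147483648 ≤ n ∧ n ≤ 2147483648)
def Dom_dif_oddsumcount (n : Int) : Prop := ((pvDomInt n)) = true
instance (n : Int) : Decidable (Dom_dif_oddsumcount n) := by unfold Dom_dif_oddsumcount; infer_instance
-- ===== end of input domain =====

-- B replaces A's list-building loop and summation loop with the closed form k*(k-1), k = (n+1)//2 (O(1) instead of O(n)).

-- ===== PORT A =====
def dif_oddsumcount (n : Int) : Int :=
  if n = 0 then 0
  else
    let odd_numbers : List Int := (PySem.List.pyRange 1 (n + 1) 2).foldl (fun acc i => acc ++ [i]) []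
    let num_odd_numbers : Int := (odd_numbers.length : Int)
    let sum_odd_numbers : Int := odd_numbers.foldl (fun s num => s + num) 0
    |sum_odd_numbers - num_odd_numbers|

-- ===== PORT B =====
def dif_oddsumcount_alt (n : Int) : Int :=
  if n ≤ 0 then 0
  else
    let k := PySem.Int.floordiv (n + 1) 2
    k * (k - 1)

-- ===== PRECONDITION & SPEC =====
def Spec_dif_oddsumcount (n : Int) (out : Int) : Prop := out = dif_oddsumcount_alt n
instance (n : Int) (out : Int) : Decidable (Spec_dif_oddsumcount n out) := by unfold Spec_dif_oddsumcount; infer_instance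

-- ===== CLAIM =====
def Claim_equal_dif_oddsumcount : Prop := ∀ (n : Int), Dom_dif_oddsumcount n → Spec_dif_oddsumcount n (dif_oddsumcount n)

-- ===== LEMMAS AND PROOFS =====
theorem pv_foldl_append (l : List Int) (a : List Int) :
    l.foldl (fun acc i => acc ++ [i]) a = a ++ l := by
  induction l generalizing a with
  | nil => simp
  | cons x xs ih => simp [List.foldl_cons, ih, List.append_assoc]

theorem pv_sum_odds (K : Nat) :
    ((List.range K).map (fun k : Nat => (1 : Int) + 2 * (k : Int))).sum = (K : Int) * K := by
  induction K with
  | zero => simp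
  | succ m ih =>
    rw [List.range_succ, List.map_append, List.sum_append, ih]
    simp only [List.map_cons, List.map_nil, List.sum_cons, List.sum_nil]
    push_cast
    ring

-- ===== VERDICT =====
theorem dif_oddsumcount_spec : Claim_equal_dif_oddsumcount := by
  intro n _
  show dif_oddsumcount n = dif_oddsumcount_alt n
  unfold dif_oddsumcount dif_oddsumcount_alt
  by_cases h0 : n = 0
  · simp [h0]
  rcases lt_or_gt_of_ne h0 with hneg | hpos
  · -- n < 0 : the range is empty, both sides are 0
    rw [if_neg h0, if_pos (le_of_lt hneg)]
    rw [PySem.List.pyRange_of_pos 1 (n + 1) (by norm_num)]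
    rw [if_neg (by omega)]
    simp
  · -- n > 0
    rw [if_neg h0, if_neg (by omega)]
    rw [PySem.List.pyRange_of_pos 1 (n + 1) (by norm_num)]
    rw [if_pos (by omega)]
    have hcount : ((n + 1 - 1 + 2 - 1) / 2) = (n + 1) / 2 := by omega
    rw [hcount]
    set K : Nat := ((n + 1) / 2).toNat with hK
    have hfd : PySem.Int.floordiv (n + 1) 2 = (K : Int) := by
      unfold PySem.Int.floordiv
      rw [Int.fdiv_eq_ediv]
      have : (0 : Int) ≤ (n + 1) / 2 := by positivity
      simp [hK]
      omega
    rw [hfd]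
    rw [pv_foldl_append, List.nil_append]
    have hsum : (((List.range K).map (fun k : Nat => (1 : Int) + 2 * (k : Int))).foldl
        (fun s num => s + num) 0) = (K : Int) * K := by
      rw [← List.sum_eq_foldl, pv_sum_odds]
    simp only [List.length_map, List.length_range]
    rw [hsum]
    have hKK : (K : Int) * K - (K : Int) = (K : Int) * ((K : Int) - 1) := by ring
    rw [hKK, abs_of_nonneg]
    rcases Nat.eq_zero_or_pos K with hz | hp
    · simp [hz]
    · have h1 : (1 : Int) ≤ (K : Int) := by exact_mod_cast hp
      nlinarith
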